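-- pv_equiv track=rewrite | github.com/MathRanger6/Ivy_Net | talent/talent_pipeline/uic_hierarchy_live_sandbox.py | get_all_subordinates
-- ===== SOURCE A (Python) =====
-- from collections import defaultdict, deque
-- from typing import Dict, Iterable, Set
--
-- def get_all_subordinates(
--     parent_children: Dict[str, Set[str]],
--     root_uic: str,
--     include_root: bool = True,
--     max_depth: int | None = None,
-- ) -> Set[str]:
--     visited = set()
--     found = set([root_uic]) if include_root else set()
--     q = deque([(root_uic, 0)])
--
--     while q:
--         cur, depth = q.popleft()
--         if cur in visited:
--             continue
--         visited.add(cur)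
--         if max_depth is not None and depth >= max_depth:
--             continue
--         for child in parent_children.get(cur, set()):
--             if child not in found:
--                 found.add(child)
--             q.append((child, depth + 1))
--     return found
-- ===== SOURCE B (Python) =====
-- def get_all_subordinates(
--     parent_children,
--     root_uic,
--     include_root=True,
--     max_depth=None,
-- ):
--     visited = set()
--     found = set([root_uic]) if include_root else set()
--     frontier = [root_uic]
--     depth = 0
--     while frontier:
--         if max_depth is not None and depth >= max_depth:
--             break
--         next_frontier = []
--         for cur in frontier:
--             if cur in visited:
--                 continue
--             visited.add(cur)
--             for child in parent_children.get(cur, set()):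
--                 found.add(child)
--                 next_frontier.append(child)
--         frontier = next_frontier
--         depth += 1
--     return found
-- ===== Notes on version B (the rewrite author's own statement) =====
-- stated objective: alternative
-- what changed: Replaces the FIFO deque of (node, depth) tuples with level-synchronous BFS: per-level frontier lists and an outer depth counter, so no depth is stored per node and the depth cutoff is a single check per level.
import Mathlib
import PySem

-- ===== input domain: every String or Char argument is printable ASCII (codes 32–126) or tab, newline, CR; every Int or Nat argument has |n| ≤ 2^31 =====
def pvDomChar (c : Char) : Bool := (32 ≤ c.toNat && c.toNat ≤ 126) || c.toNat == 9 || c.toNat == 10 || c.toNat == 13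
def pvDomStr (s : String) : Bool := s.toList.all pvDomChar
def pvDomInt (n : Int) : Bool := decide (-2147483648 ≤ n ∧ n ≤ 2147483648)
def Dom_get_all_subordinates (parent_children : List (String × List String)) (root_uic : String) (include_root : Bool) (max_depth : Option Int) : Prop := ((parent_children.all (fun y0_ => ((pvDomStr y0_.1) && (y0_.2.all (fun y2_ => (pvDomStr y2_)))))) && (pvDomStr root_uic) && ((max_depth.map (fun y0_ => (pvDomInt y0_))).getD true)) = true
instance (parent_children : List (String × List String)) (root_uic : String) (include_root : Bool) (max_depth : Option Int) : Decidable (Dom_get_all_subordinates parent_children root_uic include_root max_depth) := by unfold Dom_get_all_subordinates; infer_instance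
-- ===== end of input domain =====

-- B replaces A's FIFO deque of (node, depth) pairs by level-synchronous BFS (per-level frontier
-- lists with an outer depth counter); same return value, no speed claim.

-- dict.get(k, default []) on the input association list (first match), shared by both ports
def pvGet (pc : List (String × List String)) (k : String) : List String :=
  match pc with
  | [] => []
  | (a, b) :: rest => if a == k then b else pvGet rest k

-- ---- termination-measure machinery, cited by both ports' decreasing_by ----
def pvW (pc : List (String × List String)) (x : String) : Nat := 1 + (pvGet pc x).length

def pvPot (pc : List (String × List String)) (v : List String) : Nat :=
  (((pc.map (·.1)).filter (fun x => !(v.contains x))).map (pvW pc)).sum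

theorem pv_contains_add (v : List String) (c x : String) :
    List.contains (PySem.Set.add v c) x = (List.contains v x || c == x) := by
  rcases eq_or_ne c x with rfl | hne
  · by_cases h : c ∈ v <;> simp [h]
  · by_cases h : c ∈ v <;> simp [h, hne, Ne.symm hne]

theorem pv_sum_filter_mono {α : Type} (w : α → Nat) (p q : α → Bool)
    (hpq : ∀ x, q x = true → p x = true) (l : List α) :
    ((l.filter q).map w).sum ≤ ((l.filter p).map w).sum := by
  induction l with
  | nil => simp
  | cons a t ih =>
    rw [List.filter_cons, List.filter_cons]
    cases hq : q a with
    | true =>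
      rw [if_pos rfl, if_pos (by rw [hpq a hq])]
      simp only [List.map_cons, List.sum_cons]
      omega
    | false =>
      rw [if_neg (by simp)]
      cases hp : p a with
      | true =>
        rw [if_pos rfl]
        simp only [List.map_cons, List.sum_cons]
        omega
      | false =>
        rw [if_neg (by simp)]
        exact ih

theorem pv_sum_filter_drop {α : Type} [DecidableEq α] (w : α → Nat) (p q : α → Bool)
    (hpq : ∀ x, q x = true → p x = true) (c : α) (hc : p c = true) (hqc : q c = false)
    (l : List α) (hl : c ∈ l) :
    ((l.filter q).map w).sum + w c ≤ ((l.filter p).map w).sum := by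
  induction l with
  | nil => simp at hl
  | cons a t ih =>
    rw [List.filter_cons, List.filter_cons]
    rcases eq_or_ne a c with rfl | hne
    · rw [if_neg (by simp [hqc]), if_pos (by rw [hc])]
      simp only [List.map_cons, List.sum_cons]
      have := pv_sum_filter_mono w p q hpq t
      omega
    · have hct : c ∈ t := by
        rcases List.mem_cons.mp hl with h | h
        · exact absurd h.symm hne
        · exact h
      cases hq : q a with
      | true =>
        rw [if_pos rfl, if_pos (by rw [hpq a hq])]
        simp only [List.map_cons, List.sum_cons]
        have := ih hct
        omega
      | false =>
        rw [if_neg (by simp)]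
        cases hp : p a with
        | true =>
          rw [if_pos rfl]
          simp only [List.map_cons, List.sum_cons]
          have := ih hct
          omega
        | false =>
          rw [if_neg (by simp)]
          exact ih hct

theorem pvPot_add_le (pc : List (String × List String)) (v : List String) (c : String) :
    pvPot pc (PySem.Set.add v c) ≤ pvPot pc v := by
  apply pv_sum_filter_mono
  intro x hx
  rw [pv_contains_add] at hx
  simp only [Bool.not_eq_true'] at hx ⊢
  exact (Bool.or_eq_false_iff.mp hx).1

theorem pvPot_add_lt (pc : List (String × List String)) (v : List String) (c : String)
    (hmem : c ∈ pc.map (·.1)) (hc : v.contains c = false) :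
    pvPot pc (PySem.Set.add v c) + pvW pc c ≤ pvPot pc v := by
  apply pv_sum_filter_drop
  · intro x hx
    rw [pv_contains_add] at hx
    simp only [Bool.not_eq_true'] at hx ⊢
    exact (Bool.or_eq_false_iff.mp hx).1
  · simpa using hc
  · rw [pv_contains_add]
    simp
  · exact hmem

theorem pvGet_not_key (pc : List (String × List String)) (k : String)
    (h : k ∉ pc.map (·.1)) : pvGet pc k = [] := by
  induction pc with
  | nil => rfl
  | cons p t ih =>
    obtain ⟨a, b⟩ := p
    simp only [List.map_cons, List.mem_cons] at h
    have h1 : ¬(k = a) := fun hk => h (Or.inl hk)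
    have h2 : k ∉ t.map (·.1) := fun hk => h (Or.inr hk)
    simp only [pvGet]
    rw [if_neg (by simpa using (Ne.symm h1)), ih h2]

-- A's inner for-loop, characterised componentwise
theorem pvFoldA_spec (cs : List String) (f : List String) (r : List (String × Int)) (d : Int) :
    cs.foldl (fun (st : List String × List (String × Int)) child =>
        (if st.1.contains child then st.1 else st.1 ++ [child], st.2 ++ [(child, d + 1)])) (f, r)
    = (cs.foldl PySem.Set.add f, r ++ cs.map (fun c => (c, d + 1))) := by
  induction cs generalizing f r with
  | nil => simp
  | cons c t ih =>
    simp only [List.foldl_cons, List.map_cons]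
    rw [ih]
    simp [PySem.Set.add, List.append_assoc]

-- B's per-node step (the body of the inner for-loop over the frontier)
def pvStepB (pc : List (String × List String))
    (st : List String × List String × List String) (cur : String) :
    List String × List String × List String :=
  if st.1.contains cur then st
  else
    let v' := PySem.Set.add st.1 cur
    (pvGet pc cur).foldl
      (fun (st2 : List String × List String × List String) child =>
        (st2.1, PySem.Set.add st2.2.1 child, st2.2.2 ++ [child]))
      (v', st.2.1, st.2.2)

theorem pvFoldChild_spec (cs v f n : List String) :
    cs.foldl (fun (st2 : List String × List String × List String) child =>
        (st2.1, PySem.Set.add st2.2.1 child, st2.2.2 ++ [child])) (v, f, n)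
    = (v, cs.foldl PySem.Set.add f, n ++ cs) := by
  induction cs generalizing f n with
  | nil => simp
  | cons c t ih =>
    simp only [List.foldl_cons]
    rw [ih]
    simp

theorem pvStepB_spec (pc : List (String × List String)) (v f n : List String) (cur : String) :
    pvStepB pc (v, f, n) cur
    = if v.contains cur then (v, f, n)
      else (PySem.Set.add v cur, (pvGet pc cur).foldl PySem.Set.add f, n ++ pvGet pc cur) := by
  simp only [pvStepB]
  cases h : v.contains cur with
  | true => rw [if_pos rfl, if_pos rfl]
  | false =>
    rw [if_neg (by simp), if_neg (by simp)]
    exact pvFoldChild_spec _ _ _ _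

theorem pvStepB_pot (pc : List (String × List String))
    (v f n : List String) (cur : String) :
    pvPot pc (pvStepB pc (v, f, n) cur).1 + ((pvStepB pc (v, f, n) cur).2.2).length
      ≤ pvPot pc v + n.length := by
  rw [pvStepB_spec]
  cases h : v.contains cur with
  | true => rw [if_pos rfl]
  | false =>
    rw [if_neg (by simp)]
    simp only [List.length_append]
    by_cases hk : cur ∈ pc.map (·.1)
    · have h1 := pvPot_add_lt pc v cur hk h
      simp only [pvW] at h1
      omega
    · have h0 : pvGet pc cur = [] := pvGet_not_key pc cur hk
      have h1 := pvPot_add_le pc v cur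
      rw [h0]
      simp only [List.length_nil]
      omega

theorem pvInnerB_pot (pc : List (String × List String)) (fr : List String)
    (v f n : List String) :
    pvPot pc ((fr.foldl (pvStepB pc) (v, f, n)).1)
      + ((fr.foldl (pvStepB pc) (v, f, n)).2.2).length
      ≤ pvPot pc v + n.length := by
  induction fr generalizing v f n with
  | nil => simp
  | cons cur t ih =>
    simp only [List.foldl_cons]
    have h1 := pvStepB_pot pc v f n cur
    have h2 := ih (pvStepB pc (v, f, n) cur).1 (pvStepB pc (v, f, n) cur).2.1
      (pvStepB pc (v, f, n) cur).2.2
    exact le_trans h2 h1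

-- ===== PORT A =====
def pvGASLoopA (pc : List (String × List String)) (md : Option Int)
    (visited found : List String) (q : List (String × Int)) : List String :=
  match q with
  | [] => found
  | (cur, depth) :: rest =>
    if visited.contains cur then
      pvGASLoopA pc md visited found rest
    else
      let visited' := PySem.Set.add visited cur
      if (match md with | some m => decide (depth ≥ m) | none => false) then
        pvGASLoopA pc md visited' found rest
      else
        let st := (pvGet pc cur).foldl
          (fun (st : List String × List (String × Int)) child =>
            (if st.1.contains child then st.1 else st.1 ++ [child], st.2 ++ [(child, depth + 1)]))
          (found, rest)
        pvGASLoopA pc md visited' st.1 st.2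
termination_by pvPot pc visited + q.length
decreasing_by
  · simp only [List.length_cons]; omega
  · have h := pvPot_add_le pc visited cur
    simp only [List.length_cons]
    omega
  · have hvc : visited.contains cur = false := Bool.eq_false_iff.mpr (by assumption)
    by_cases hk : cur ∈ pc.map (·.1)
    · have h := pvPot_add_lt pc visited cur hk hvc
      simp only [pvW] at h
      simp only [dite_eq_ite, pvFoldA_spec, List.length_append, List.length_map,
        List.length_cons]
      omega
    · have h0 : pvGet pc cur = [] := pvGet_not_key pc cur hk
      have h := pvPot_add_le pc visited cur
      simp only [dite_eq_ite, pvFoldA_spec, h0, List.length_append, List.length_map,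
        List.length_nil, List.length_cons]
      omega

def get_all_subordinates (parent_children : List (String × List String)) (root_uic : String)
    (include_root : Bool) (max_depth : Option Int) : List String :=
  let visited : List String := PySem.Set.empty
  let found : List String := if include_root then PySem.Set.ofList [root_uic] else PySem.Set.empty
  pvGASLoopA parent_children max_depth visited found [(root_uic, 0)]

-- ===== PORT B =====
def pvGASLevelB (pc : List (String × List String)) (md : Option Int)
    (visited found frontier : List String) (depth : Int) : List String :=
  match frontier with
  | [] => found
  | _ :: _ =>
    if (match md with | some m => decide (depth ≥ m) | none => false) then found
    else
      let st := frontier.foldl (pvStepB pc) (visited, found, [])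
      pvGASLevelB pc md st.1 st.2.1 st.2.2 (depth + 1)
termination_by pvPot pc visited + frontier.length
decreasing_by
  have h := pvInnerB_pot pc frontier visited found []
  simp only [List.length_nil, Nat.add_zero] at h
  simp only [List.foldl_attach, List.length_cons]
  omega

def get_all_subordinates_alt (parent_children : List (String × List String)) (root_uic : String)
    (include_root : Bool) (max_depth : Option Int) : List String :=
  let visited : List String := PySem.Set.empty
  let found : List String := if include_root then PySem.Set.ofList [root_uic] else PySem.Set.empty
  pvGASLevelB parent_children max_depth visited found [root_uic] 0

-- ===== PRECONDITION & SPEC =====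
def Spec_get_all_subordinates (parent_children : List (String × List String)) (root_uic : String) (include_root : Bool) (max_depth : Option Int) (out : List String) : Prop := out = get_all_subordinates_alt parent_children root_uic include_root max_depth
instance (parent_children : List (String × List String)) (root_uic : String) (include_root : Bool) (max_depth : Option Int) (out : List String) : Decidable (Spec_get_all_subordinates parent_children root_uic include_root max_depth out) := by unfold Spec_get_all_subordinates; infer_instance

-- ===== CLAIM (what is proved, stated in full; the proofs are below) =====
def Claim_equal_get_all_subordinates : Prop := ∀ (parent_children : List (String × List String)) (root_uic : String) (include_root : Bool) (max_depth : Option Int), Dom_get_all_subordinates parent_children root_uic include_root max_depth → Spec_get_all_subordinates parent_children root_uic include_root max_depth (get_all_subordinates parent_children root_uic include_root max_depth)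

-- ===== LEMMAS AND PROOFS =====

theorem pvLoopA_nil (pc : List (String × List String)) (md : Option Int)
    (visited found : List String) :
    pvGASLoopA pc md visited found [] = found := by
  rw [pvGASLoopA.eq_def]

theorem pvLoopA_cons (pc : List (String × List String)) (md : Option Int)
    (visited found : List String) (cur : String) (depth : Int) (rest : List (String × Int)) :
    pvGASLoopA pc md visited found ((cur, depth) :: rest)
    = if visited.contains cur then
        pvGASLoopA pc md visited found rest
      else
        if (match md with | some m => decide (depth ≥ m) | none => false) then
          pvGASLoopA pc md (PySem.Set.add visited cur) found rest
        else
          let st := (pvGet pc cur).foldl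
            (fun (st : List String × List (String × Int)) child =>
              (if st.1.contains child then st.1 else st.1 ++ [child], st.2 ++ [(child, depth + 1)]))
            (found, rest)
          pvGASLoopA pc md (PySem.Set.add visited cur) st.1 st.2 := by
  rw [pvGASLoopA.eq_def]

theorem pvLevelB_nil (pc : List (String × List String)) (md : Option Int)
    (visited found : List String) (depth : Int) :
    pvGASLevelB pc md visited found [] depth = found := by
  rw [pvGASLevelB.eq_def]

theorem pvLevelB_cons (pc : List (String × List String)) (md : Option Int)
    (visited found : List String) (a : String) (t : List String) (depth : Int) :
    pvGASLevelB pc md visited found (a :: t) depth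
    = if (match md with | some m => decide (depth ≥ m) | none => false) then found
      else
        let st := (a :: t).foldl (pvStepB pc) (visited, found, [])
        pvGASLevelB pc md st.1 st.2.1 st.2.2 (depth + 1) := by
  rw [pvGASLevelB.eq_def]

-- A's loop returns found unchanged once every queued depth has reached the cutoff
theorem pvLoopA_cut (pc : List (String × List String)) (m : Int)
    (q : List (String × Int)) (visited found : List String)
    (hq : ∀ p ∈ q, m ≤ p.2) :
    pvGASLoopA pc (some m) visited found q = found := by
  induction q generalizing visited with
  | nil => exact pvLoopA_nil ..
  | cons p rest ih =>
    obtain ⟨cur, depth⟩ := p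
    rw [pvLoopA_cons]
    have hd : m ≤ depth := hq (cur, depth) (List.mem_cons_self ..)
    have hrest : ∀ p ∈ rest, m ≤ p.2 := fun p hp => hq p (List.mem_cons_of_mem _ hp)
    by_cases h : visited.contains cur
    · rw [if_pos h]
      exact ih _ hrest
    · rw [if_neg h, if_pos (by simpa using hd)]
      exact ih _ hrest

-- processing one frontier level: A's queue run of (frontier at d) ++ (next at d+1) equals
-- first folding B's per-node step over the frontier, then continuing at depth d+1
theorem pvLoopA_level (pc : List (String × List String)) (md : Option Int) (d : Int)
    (hcut : (match md with | some m => decide (d ≥ m) | none => false) = false)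
    (fr : List String) (visited found n : List String) :
    pvGASLoopA pc md visited found
        (fr.map (fun x => (x, d)) ++ n.map (fun x => (x, d + 1)))
    = pvGASLoopA pc md (fr.foldl (pvStepB pc) (visited, found, n)).1
        (fr.foldl (pvStepB pc) (visited, found, n)).2.1
        ((fr.foldl (pvStepB pc) (visited, found, n)).2.2.map (fun x => (x, d + 1))) := by
  induction fr generalizing visited found n with
  | nil => rfl
  | cons cur t ih =>
    simp only [List.map_cons, List.cons_append, List.foldl_cons]
    rw [pvLoopA_cons, pvStepB_spec]
    by_cases h : visited.contains cur
    · rw [if_pos h, if_pos h]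
      exact ih visited found n
    · rw [if_neg h, if_neg h, if_neg (by rw [hcut]; simp)]
      simp only [pvFoldA_spec]
      have := ih (PySem.Set.add visited cur) ((pvGet pc cur).foldl PySem.Set.add found)
        (n ++ pvGet pc cur)
      simp only [List.map_append, List.append_assoc] at this ⊢
      exact this

-- A's queue run over a single level equals B's level loop (strong induction on the potential)
theorem pvLoopA_eq_levelB (pc : List (String × List String)) (md : Option Int) :
    ∀ (k : Nat) (visited found fr : List String) (d : Int),
      pvPot pc visited + fr.length ≤ k →
      pvGASLoopA pc md visited found (fr.map (fun x => (x, d)))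
        = pvGASLevelB pc md visited found fr d := by
  intro k
  induction k with
  | zero =>
    intro visited found fr d hk
    have hfr : fr = [] := by
      cases fr with
      | nil => rfl
      | cons a t => simp only [List.length_cons] at hk; omega
    subst hfr
    rw [List.map_nil, pvLoopA_nil, pvLevelB_nil]
  | succ k ih =>
    intro visited found fr d hk
    cases fr with
    | nil => rw [List.map_nil, pvLoopA_nil, pvLevelB_nil]
    | cons a t =>
      rw [pvLevelB_cons]
      cases md with
      | none =>
        rw [if_neg (by simp)]
        have hlvl := pvLoopA_level pc none d (by simp) (a :: t) visited found []
        simp only [List.map_nil, List.append_nil] at hlvl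
        rw [hlvl]
        have hpot := pvInnerB_pot pc (a :: t) visited found []
        simp only [List.length_nil, Nat.add_zero] at hpot
        apply ih
        simp only [List.length_cons] at hk
        omega
      | some m =>
        by_cases hdm : d ≥ m
        · rw [if_pos (by simpa using hdm)]
          apply pvLoopA_cut
          intro p hp
          simp only [List.map_cons, List.mem_cons, List.mem_map] at hp
          rcases hp with rfl | ⟨x, _, rfl⟩ <;> simpa using hdm
        · rw [if_neg (by simpa using hdm)]
          have hlvl := pvLoopA_level pc (some m) d (by simpa using hdm) (a :: t) visited found []
          simp only [List.map_nil, List.append_nil] at hlvl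
          rw [hlvl]
          have hpot := pvInnerB_pot pc (a :: t) visited found []
          simp only [List.length_nil, Nat.add_zero] at hpot
          apply ih
          simp only [List.length_cons] at hk
          omega

-- ===== VERDICT (by name: the statement is the Claim_ definition above) =====
theorem get_all_subordinates_spec : Claim_equal_get_all_subordinates := by
  intro pc root inc md _
  unfold Spec_get_all_subordinates get_all_subordinates get_all_subordinates_alt
  have h := pvLoopA_eq_levelB pc md
    (pvPot pc PySem.Set.empty + 1) PySem.Set.empty
    (if inc then PySem.Set.ofList [root] else PySem.Set.empty) [root] 0 (by simp)
  simpa using h
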